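-- pv_equiv track=rewrite | github.com/diego-ninja/crate | app/crate/api/jam.py | _normalise_room_tags
-- ===== SOURCE A (Python) =====
-- def _normalise_room_tags(tags: list[str] | None) -> list[str]:
--     seen: set[str] = set()
--     normalised: list[str] = []
--     for raw in tags or []:
--         tag = raw.strip().lower()
--         if not tag or tag in seen:
--             continue
--         seen.add(tag)
--         normalised.append(tag[:40])
--         if len(normalised) >= 12:
--             break
--     return normalised
-- ===== SOURCE B (Python) =====
-- def _normalise_room_tags(tags):
--     norm = [raw.strip().lower() for raw in (tags or [])]
--     norm = [t for t in norm if t]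
--     kept = list(dict.fromkeys(norm))[:12]
--     return [t[:40] for t in kept]
-- ===== Notes on version B (the rewrite author's own statement) =====
-- stated objective: simpler
-- what changed: Replaces the single interleaved loop with mutable seen-set/early-break by a pipeline of whole-list passes: normalize all tags, drop empties, order-preserving dedup via dict.fromkeys, slice to 12, then truncate each to 40.
import Mathlib
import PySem

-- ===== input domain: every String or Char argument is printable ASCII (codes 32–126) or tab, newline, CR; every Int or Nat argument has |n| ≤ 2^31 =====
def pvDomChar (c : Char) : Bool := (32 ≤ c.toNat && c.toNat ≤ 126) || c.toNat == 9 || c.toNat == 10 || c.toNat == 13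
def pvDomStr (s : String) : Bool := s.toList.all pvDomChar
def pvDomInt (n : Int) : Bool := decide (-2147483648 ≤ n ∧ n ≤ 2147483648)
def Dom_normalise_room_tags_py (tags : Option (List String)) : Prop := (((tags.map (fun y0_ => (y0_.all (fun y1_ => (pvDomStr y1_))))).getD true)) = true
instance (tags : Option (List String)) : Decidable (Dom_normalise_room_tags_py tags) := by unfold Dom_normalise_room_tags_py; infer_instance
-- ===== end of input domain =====

-- B replaces A's single interleaved loop (mutable seen set, early break) by a pipeline of
-- whole-list passes: normalize, drop empties, dedup (dict.fromkeys), slice to 12, truncate.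

-- ===== PORT A =====
-- A's loop: per element, normalize, skip empty/seen, append truncated, break at 12 kept.
def pvALoop (xs : List String) (seen : PySem.Set String) (acc : List String) : List String :=
  match xs with
  | [] => acc
  | raw :: rest =>
    let tag := PySem.Str.lower (PySem.Str.strip raw)
    if tag = "" ∨ tag ∈ seen then pvALoop rest seen acc
    else
      let acc' := acc ++ [PySem.Str.slice tag none (some 40)]
      if 12 ≤ acc'.length then acc' else pvALoop rest (PySem.Set.add seen tag) acc'

def normalise_room_tags_py (tags : Option (List String)) : List String :=
  pvALoop (tags.getD []) PySem.Set.empty []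

-- ===== PORT B =====
def normalise_room_tags_py_alt (tags : Option (List String)) : List String :=
  let norm := ((tags.getD []).map (fun raw => PySem.Str.lower (PySem.Str.strip raw))).filter
    (fun t => decide (t ≠ ""))
  (PySem.List.slice (PySem.List.dedup norm) none (some 12)).map
    (fun t => PySem.Str.slice t none (some 40))

-- ===== PRECONDITION & SPEC =====
def Spec_normalise_room_tags_py (tags : Option (List String)) (out : List String) : Prop := out = normalise_room_tags_py_alt tags
instance (tags : Option (List String)) (out : List String) : Decidable (Spec_normalise_room_tags_py tags out) := by unfold Spec_normalise_room_tags_py; infer_instance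

-- ===== CLAIM (what is proved, stated in full; the proofs are below) =====
def Claim_equal_normalise_room_tags_py : Prop := ∀ (tags : Option (List String)), Dom_normalise_room_tags_py tags → Spec_normalise_room_tags_py tags (normalise_room_tags_py tags)

-- ===== LEMMAS AND PROOFS =====

-- proof-side helper: the tags A would newly keep (untruncated), given a seen set, without the cap
def pvNewTags (xs : List String) (seen : PySem.Set String) : List String :=
  match xs with
  | [] => []
  | raw :: rest =>
    let tag := PySem.Str.lower (PySem.Str.strip raw)
    if tag = "" ∨ tag ∈ seen then pvNewTags rest seen
    else tag :: pvNewTags rest (PySem.Set.add seen tag)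

-- proof-side helper: dedup relative to an initial seen set
def pvDedupSkip (ys : List String) (seen : PySem.Set String) : List String :=
  match ys with
  | [] => []
  | a :: rest =>
    if a ∈ seen then pvDedupSkip rest seen
    else a :: pvDedupSkip rest (PySem.Set.add seen a)

lemma pvALoop_eq (xs : List String) (seen : PySem.Set String) (acc : List String)
    (h : acc.length < 12) :
    pvALoop xs seen acc
      = acc ++ ((pvNewTags xs seen).take (12 - acc.length)).map
          (fun t => PySem.Str.slice t none (some 40)) := by
  induction xs generalizing seen acc with
  | nil => simp [pvALoop, pvNewTags]
  | cons raw rest ih =>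
    simp only [pvALoop, pvNewTags]
    split
    · exact ih seen acc h
    · by_cases hc : 12 ≤ (acc ++ [PySem.Str.slice (PySem.Str.lower (PySem.Str.strip raw)) none (some 40)]).length
      · simp only [if_pos hc]
        have : 12 - acc.length = 1 := by simp at hc; omega
        simp [this]
      · simp only [if_neg hc]
        rw [ih _ _ (by simp at hc ⊢; omega)]
        have : 12 - acc.length = (12 - (acc.length + 1)) + 1 := by simp at hc; omega
        simp [this, List.take_succ_cons, List.append_assoc]

lemma pvNewTags_eq (xs : List String) (seen : PySem.Set String) :
    pvNewTags xs seen
      = pvDedupSkip ((xs.map (fun raw => PySem.Str.lower (PySem.Str.strip raw))).filter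
          (fun t => decide (t ≠ ""))) seen := by
  induction xs generalizing seen with
  | nil => simp [pvNewTags, pvDedupSkip]
  | cons raw rest ih =>
    simp only [pvNewTags, List.map_cons, List.filter_cons]
    by_cases he : PySem.Str.lower (PySem.Str.strip raw) = ""
    · simp [he, ih]
    · by_cases hs : PySem.Str.lower (PySem.Str.strip raw) ∈ seen
      · simp [he, hs, pvDedupSkip, ih]
      · simp [he, hs, pvDedupSkip, ih]

lemma foldl_add_eq (ys : List String) (seen : PySem.Set String) :
    ys.foldl PySem.Set.add seen = seen ++ pvDedupSkip ys seen := by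
  induction ys generalizing seen with
  | nil => simp [pvDedupSkip]
  | cons a rest ih =>
    simp only [List.foldl_cons, pvDedupSkip]
    by_cases hm : a ∈ seen
    · have h1 : PySem.Set.add seen a = seen := by
        simp [PySem.Set.add]
        exact hm
      rw [h1, ih]
      simp [hm]
    · have hadd : PySem.Set.add seen a = seen ++ [a] := by
        simp [PySem.Set.add, hm]
      rw [hadd, ih]
      simp [hm, List.append_assoc]

lemma dedup_eq_skip (ys : List String) :
    PySem.List.dedup ys = pvDedupSkip ys PySem.Set.empty := by
  have := foldl_add_eq ys PySem.Set.empty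
  simp [PySem.Set.empty] at this
  simp [PySem.List.dedup_eq_ofList, PySem.Set.ofList_eq_foldl, PySem.Set.empty, this]

-- ===== VERDICT (by name: the statement is the Claim_ definition above) =====
theorem normalise_room_tags_py_spec : Claim_equal_normalise_room_tags_py := by
  intro tags _
  unfold Spec_normalise_room_tags_py normalise_room_tags_py normalise_room_tags_py_alt
  rw [pvALoop_eq _ _ _ (by simp), pvNewTags_eq, ← dedup_eq_skip]
  simp [PySem.List.slice_to]
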